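-- pv_equiv track=rewrite | github.com/864684766/chocolate | app/rag/processing/utils/quality_utils.py | contains_blacklisted
-- ===== SOURCE A (Python) =====
-- from typing import Iterable, List, Tuple, Optional
--
-- def contains_blacklisted(text: str, keywords: Iterable[str]) -> bool:
--     """检测是否包含黑名单关键词（大小写不敏感）。
--
--     Args:
--         text (str): 需要检测的文本内容
--         keywords (Iterable[str]): 黑名单关键词列表，可以是列表、集合等可迭代对象
--
--     Returns:
--         bool: True 表示文本包含黑名单关键词，False 表示不包含
--     """
--     if not text:
--         return False
--     lowered = text.lower()
--     for kw in keywords: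
--         if kw and kw.lower() in lowered:
--             return True
--     return False
-- ===== SOURCE B (Python) =====
-- def contains_blacklisted(text: str, keywords) -> bool:
--     """Blacklist check: reduce the keyword list to a minimal set first
--     (a keyword that contains another keyword can never be the only match,
--     so it is dropped, as are empty strings and duplicates), then run one
--     substring search over the lowered text per surviving keyword."""
--     lowered = text.lower()
--     minimal = []
--     for kw in keywords:
--         k = kw.lower()
--         if k and not any(m in k for m in minimal):
--             minimal.append(k)
--     return any(k in lowered for k in minimal)
-- ===== Notes on version B (the rewrite author's own statement) =====
-- stated objective: alternative
-- what changed: B first prunes the keyword set to a minimal antichain (dropping empty strings, duplicates and any keyword that contains an already-kept keyword, which can never be the sole match) and only then runs one substring search per surviving keyword, instead of A's direct loop of one search per raw keyword.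
import Mathlib
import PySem

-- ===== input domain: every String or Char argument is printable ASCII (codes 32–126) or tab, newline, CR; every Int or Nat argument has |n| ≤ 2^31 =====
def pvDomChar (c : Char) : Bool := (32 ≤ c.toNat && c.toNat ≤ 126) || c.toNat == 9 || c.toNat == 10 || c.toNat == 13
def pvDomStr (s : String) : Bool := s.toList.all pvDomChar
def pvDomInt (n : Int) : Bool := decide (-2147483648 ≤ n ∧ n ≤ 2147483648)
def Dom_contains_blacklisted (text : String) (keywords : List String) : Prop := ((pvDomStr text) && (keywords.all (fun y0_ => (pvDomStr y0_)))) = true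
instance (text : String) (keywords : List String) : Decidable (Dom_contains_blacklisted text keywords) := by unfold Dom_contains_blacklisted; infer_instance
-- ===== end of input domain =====

-- B prunes the keyword list to a minimal set (no empties, duplicates, or keywords containing an
-- already-kept keyword) before searching, instead of A's one search per raw keyword (alternative algorithm).


-- ===== PORT A =====
-- 'if not text: return False'; then 'for kw in keywords: if kw and kw.lower() in lowered: return True'
def contains_blacklisted (text : String) (keywords : List String) : Bool :=
  if text.toList = [] then false
  else
    let lowered := PySem.Chars.lower text.toList
    keywords.any (fun kw => !kw.toList.isEmpty && PySem.Chars.isIn (PySem.Chars.lower kw.toList) lowered)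

-- ===== PORT B =====
-- pruning loop: append k unless empty or some already-kept m is a substring of k; then search
def contains_blacklisted_alt (text : String) (keywords : List String) : Bool :=
  let lowered := PySem.Chars.lower text.toList
  let minimal := keywords.foldl
    (fun acc kw =>
      let k := PySem.Chars.lower kw.toList
      if !k.isEmpty && !acc.any (fun m => PySem.Chars.isIn m k) then acc ++ [k] else acc)
    []
  minimal.any (fun k => PySem.Chars.isIn k lowered)

-- ===== PRECONDITION & SPEC =====
def Spec_contains_blacklisted (text : String) (keywords : List String) (out : Bool) : Prop := out = contains_blacklisted_alt text keywords
instance (text : String) (keywords : List String) (out : Bool) : Decidable (Spec_contains_blacklisted text keywords out) := by unfold Spec_contains_blacklisted; infer_instance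

-- ===== CLAIM =====
def Claim_equal_contains_blacklisted : Prop := ∀ (text : String) (keywords : List String), Dom_contains_blacklisted text keywords → Spec_contains_blacklisted text keywords (contains_blacklisted text keywords)

-- ===== LEMMAS AND PROOFS =====

theorem pv_lower_eq_nil_iff (l : List Char) : PySem.Chars.lower l = [] ↔ l = [] := by
  cases l <;> simp [PySem.Chars.lower]

-- substring containment is transitive
theorem pv_isIn_trans {a b c : List Char} (h1 : PySem.Chars.isIn a b = true)
    (h2 : PySem.Chars.isIn b c = true) : PySem.Chars.isIn a c = true := by
  rw [PySem.Chars.isIn_iff_infix] at *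
  exact h1.trans h2

-- loop invariant: searching the pruned set extends the search over the accumulator by
-- exactly the naive per-keyword test over the remaining keywords
theorem pv_fold_any (lowered : List Char) (kws : List String) :
    ∀ acc : List (List Char),
      ((kws.foldl
        (fun acc kw =>
          let k := PySem.Chars.lower kw.toList
          if !k.isEmpty && !acc.any (fun m => PySem.Chars.isIn m k) then acc ++ [k] else acc)
        acc).any (fun k => PySem.Chars.isIn k lowered))
      = (acc.any (fun k => PySem.Chars.isIn k lowered)
         || kws.any (fun kw => !(PySem.Chars.lower kw.toList).isEmpty
              && PySem.Chars.isIn (PySem.Chars.lower kw.toList) lowered)) := by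
  induction kws with
  | nil => intro acc; simp
  | cons kw rest ih =>
    intro acc
    simp only [List.foldl_cons, List.any_cons]
    by_cases hkeep : (!(PySem.Chars.lower kw.toList).isEmpty
        && !acc.any (fun m => PySem.Chars.isIn m (PySem.Chars.lower kw.toList))) = true
    · rw [if_pos hkeep, ih]
      obtain ⟨hne, -⟩ := Bool.and_eq_true_iff.mp hkeep
      simp [hne, Bool.or_assoc, Bool.or_comm, Bool.or_left_comm]
    · rw [if_neg hkeep, ih]
      rw [Bool.and_eq_true, not_and_or] at hkeep
      rcases hkeep with h | h
      · have he : (PySem.Chars.lower kw.toList).isEmpty = true := by simpa using h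
        simp [he]
      · have h' : acc.any (fun m => PySem.Chars.isIn m (PySem.Chars.lower kw.toList)) = true := by
          simpa using h
        by_cases hk : PySem.Chars.isIn (PySem.Chars.lower kw.toList) lowered = true
        · obtain ⟨m, hm, hmk⟩ := List.any_eq_true.mp h'
          have hacc : acc.any (fun k => PySem.Chars.isIn k lowered) = true :=
            List.any_eq_true.mpr ⟨m, hm, pv_isIn_trans hmk hk⟩
          simp [hacc]
        · simp [Bool.eq_false_iff.mpr hk]

-- a nonempty pattern is never a substring of the empty text (with the emptiness test bundled)
theorem pv_term_nil (k : List Char) : (!k.isEmpty && PySem.Chars.isIn k []) = false := by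
  cases hk : k.isEmpty
  · have : PySem.Chars.isIn k [] = false := by
      rw [PySem.Chars.isIn_eq_false_iff]
      intro hin
      simp [List.infix_nil.mp hin] at hk
    simp [this]
  · simp

-- ===== VERDICT =====
theorem contains_blacklisted_spec : Claim_equal_contains_blacklisted := by
  intro text keywords _
  unfold Spec_contains_blacklisted contains_blacklisted contains_blacklisted_alt
  simp only [pv_fold_any, List.any_nil, Bool.false_or]
  by_cases ht : text.toList = []
  · rw [if_pos ht]
    have hlow : PySem.Chars.lower text.toList = [] := (pv_lower_eq_nil_iff _).mpr ht
    rw [hlow]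
    simp [pv_term_nil]
  · rw [if_neg ht]
    congr 1
    funext kw
    congr 1
    rw [Bool.eq_iff_iff]
    simp [pv_lower_eq_nil_iff]
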